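-- pv_equiv track=rewrite | github.com/foreandr/CrawlRori | func.py | get_recording_tool_data
-- ===== SOURCE A (Python) =====
-- def get_recording_tool_data(recording_tool_data):
--     algemeen_data = None
--     omgevingskenmerken_data = None
--     gebouwen_data = None
--     ruimtes_data = None
--     schades_data = None
--     bijlagen_data = None
--     samenvatting_data = None
--
--     # Loop through recording_tool_data to categorize data by tab_type
--     for item in recording_tool_data:
--         tab_type = item["tab_type"]
--         if tab_type == "algemeen":
--             algemeen_data = item
--         elif tab_type == "omgevingskenmerken":
--             omgevingskenmerken_data = item
--         elif tab_type == "gebouwen":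
--             gebouwen_data = item
--         elif tab_type == "ruimtes":
--             ruimtes_data = item
--         elif tab_type == "schades":
--             schades_data = item
--         elif tab_type == "bijlagen":
--             bijlagen_data = item
--         elif tab_type == "samenvatting":
--             samenvatting_data = item
--
--
--     return algemeen_data, omgevingskenmerken_data, gebouwen_data, ruimtes_data, schades_data, bijlagen_data, samenvatting_data
-- ===== SOURCE B (Python) =====
-- _TABS = ("algemeen", "omgevingskenmerken", "gebouwen", "ruimtes",
--          "schades", "bijlagen", "samenvatting")
--
-- def get_recording_tool_data(recording_tool_data):
--     # Staged passes: for each of the seven known tabs, scan the list from the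
--     # end and take the first (i.e. last-in-order) item with that tab_type.
--     return tuple(
--         next((item for item in reversed(recording_tool_data)
--               if item["tab_type"] == tab), None)
--         for tab in _TABS
--     )
-- ===== Notes on version B (the rewrite author's own statement) =====
-- stated objective: simpler
-- what changed: Replaces the single stateful pass with seven slot variables by seven independent reverse scans, one per known tab, each taking the last item of that tab_type (no accumulator at all).
import Mathlib
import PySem

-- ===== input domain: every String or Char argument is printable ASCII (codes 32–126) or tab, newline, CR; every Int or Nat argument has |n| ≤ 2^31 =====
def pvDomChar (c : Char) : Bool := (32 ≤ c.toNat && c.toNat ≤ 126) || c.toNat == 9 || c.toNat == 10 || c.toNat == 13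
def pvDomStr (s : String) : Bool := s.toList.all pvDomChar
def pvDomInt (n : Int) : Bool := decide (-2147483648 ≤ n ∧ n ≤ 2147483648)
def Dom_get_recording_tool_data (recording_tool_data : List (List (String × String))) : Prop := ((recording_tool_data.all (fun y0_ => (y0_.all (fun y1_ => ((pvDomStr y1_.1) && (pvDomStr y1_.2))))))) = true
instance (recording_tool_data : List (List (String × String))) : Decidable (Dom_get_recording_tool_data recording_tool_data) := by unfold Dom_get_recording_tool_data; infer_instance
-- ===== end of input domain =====

-- B replaces A's single stateful pass over seven slot variables by seven independent reverse scans (one List.find? per tab); return value only, same result.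


-- shared dict-access helper: item["tab_type"] (dict lookup; "" stands for the
-- KeyError case, which Pre_ excludes)
def pvTag (item : List (String × String)) : String :=
  ((PySem.Dict.ofList item).get? "tab_type").getD ""

-- ===== PORT A =====
def pvStepA (s : (Option (List (String × String))) × (Option (List (String × String))) × (Option (List (String × String))) × (Option (List (String × String))) × (Option (List (String × String))) × (Option (List (String × String))) × (Option (List (String × String)))) (item : List (String × String)) : (Option (List (String × String))) × (Option (List (String × String))) × (Option (List (String × String))) × (Option (List (String × String))) × (Option (List (String × String))) × (Option (List (String × String))) × (Option (List (String × String))) :=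
  let t := pvTag item
  if t = "algemeen" then (some item, s.2)
  else if t = "omgevingskenmerken" then (s.1, some item, s.2.2)
  else if t = "gebouwen" then (s.1, s.2.1, some item, s.2.2.2)
  else if t = "ruimtes" then (s.1, s.2.1, s.2.2.1, some item, s.2.2.2.2)
  else if t = "schades" then (s.1, s.2.1, s.2.2.1, s.2.2.2.1, some item, s.2.2.2.2.2)
  else if t = "bijlagen" then (s.1, s.2.1, s.2.2.1, s.2.2.2.1, s.2.2.2.2.1, some item, s.2.2.2.2.2.2)
  else if t = "samenvatting" then (s.1, s.2.1, s.2.2.1, s.2.2.2.1, s.2.2.2.2.1, s.2.2.2.2.2.1, some item)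
  else s

def get_recording_tool_data (recording_tool_data : List (List (String × String))) : (Option (List (String × String))) × (Option (List (String × String))) × (Option (List (String × String))) × (Option (List (String × String))) × (Option (List (String × String))) × (Option (List (String × String))) × (Option (List (String × String))) :=
  recording_tool_data.foldl pvStepA (none, none, none, none, none, none, none)

-- ===== PORT B =====
-- next((item for item in reversed(data) if item["tab_type"] == tab), None)
def pvLast (xs : List (List (String × String))) (tab : String) : Option (List (String × String)) :=
  xs.reverse.find? (fun item => pvTag item == tab)

def get_recording_tool_data_alt (recording_tool_data : List (List (String × String))) : (Option (List (String × String))) × (Option (List (String × String))) × (Option (List (String × String))) × (Option (List (String × String))) × (Option (List (String × String))) × (Option (List (String × String))) × (Option (List (String × String))) :=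
  (pvLast recording_tool_data "algemeen",
   pvLast recording_tool_data "omgevingskenmerken",
   pvLast recording_tool_data "gebouwen",
   pvLast recording_tool_data "ruimtes",
   pvLast recording_tool_data "schades",
   pvLast recording_tool_data "bijlagen",
   pvLast recording_tool_data "samenvatting")

-- ===== PRECONDITION & SPEC =====
-- Pre_ excludes only inputs where some item lacks the "tab_type" key, on which Python A raises KeyError.
def Pre_get_recording_tool_data (recording_tool_data : List (List (String × String))) : Prop :=
  (recording_tool_data.all (fun item => item.any (fun p => p.1 == "tab_type"))) = true
instance (recording_tool_data : List (List (String × String))) : Decidable (Pre_get_recording_tool_data recording_tool_data) := by unfold Pre_get_recording_tool_data; infer_instance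

def pvWitness_get_recording_tool_data : (List (List (String × String))) :=
  [[("tab_type", "gebouwen"), ("v", "1")], [("tab_type", "other")]]

def Spec_get_recording_tool_data (recording_tool_data : List (List (String × String))) (out : (Option (List (String × String))) × (Option (List (String × String))) × (Option (List (String × String))) × (Option (List (String × String))) × (Option (List (String × String))) × (Option (List (String × String))) × (Option (List (String × String)))) : Prop := out = get_recording_tool_data_alt recording_tool_data
instance (recording_tool_data : List (List (String × String))) (out : (Option (List (String × String))) × (Option (List (String × String))) × (Option (List (String × String))) × (Option (List (String × String))) × (Option (List (String × String))) × (Option (List (String × String))) × (Option (List (String × String)))) : Decidable (Spec_get_recording_tool_data recording_tool_data out) := by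
  unfold Spec_get_recording_tool_data
  have h1 : DecidableEq (Option (List (String × String))) := inferInstance
  have h2 : DecidableEq ((Option (List (String × String))) × (Option (List (String × String)))) := inferInstance
  have h3 : DecidableEq ((Option (List (String × String))) × (Option (List (String × String))) × (Option (List (String × String)))) := inferInstance
  have h4 : DecidableEq ((Option (List (String × String))) × (Option (List (String × String))) × (Option (List (String × String))) × (Option (List (String × String)))) := inferInstance
  have h5 : DecidableEq ((Option (List (String × String))) × (Option (List (String × String))) × (Option (List (String × String))) × (Option (List (String × String))) × (Option (List (String × String)))) := inferInstance
  have h6 : DecidableEq ((Option (List (String × String))) × (Option (List (String × String))) × (Option (List (String × String))) × (Option (List (String × String))) × (Option (List (String × String))) × (Option (List (String × String)))) := inferInstance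
  infer_instance

-- ===== CLAIM (what is proved, stated in full; the proofs are below) =====
def Claim_equal_get_recording_tool_data : Prop := ∀ (recording_tool_data : List (List (String × String))), Dom_get_recording_tool_data recording_tool_data → Pre_get_recording_tool_data recording_tool_data → Spec_get_recording_tool_data recording_tool_data (get_recording_tool_data recording_tool_data)

-- ===== LEMMAS AND PROOFS =====

-- one step of pvLast: prepending x makes x the fallback after the rest of the list
theorem pvLast_cons (x : List (String × String)) (rest : List (List (String × String))) (tab : String) :
    pvLast (x :: rest) tab
      = (pvLast rest tab).or (if pvTag x = tab then some x else none) := by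
  cases hf : rest.reverse.find? (fun item => pvTag item == tab) <;>
    by_cases h : pvTag x = tab <;>
      simp [pvLast, List.find?_append, hf, h, Option.or]

-- A's step written slot-wise with Option.or
theorem pvStepA_eq (s : (Option (List (String × String))) × (Option (List (String × String))) × (Option (List (String × String))) × (Option (List (String × String))) × (Option (List (String × String))) × (Option (List (String × String))) × (Option (List (String × String)))) (x : List (String × String)) :
    pvStepA s x
      = ((if pvTag x = "algemeen" then some x else none).or s.1,
         (if pvTag x = "omgevingskenmerken" then some x else none).or s.2.1,
         (if pvTag x = "gebouwen" then some x else none).or s.2.2.1,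
         (if pvTag x = "ruimtes" then some x else none).or s.2.2.2.1,
         (if pvTag x = "schades" then some x else none).or s.2.2.2.2.1,
         (if pvTag x = "bijlagen" then some x else none).or s.2.2.2.2.2.1,
         (if pvTag x = "samenvatting" then some x else none).or s.2.2.2.2.2.2) := by
  rw [pvStepA]
  split_ifs with h1 h2 h3 h4 h5 h6 h7 <;> simp_all [Option.or]

-- Invariant: A's fold from any start state gives, in each slot, the last matching
-- item if there is one, otherwise the start value of that slot.
theorem pv_fold_eq (xs : List (List (String × String)))
    (a b c d e f g : Option (List (String × String))) :
    xs.foldl pvStepA (a, b, c, d, e, f, g)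
      = ((pvLast xs "algemeen").or a, (pvLast xs "omgevingskenmerken").or b,
         (pvLast xs "gebouwen").or c, (pvLast xs "ruimtes").or d,
         (pvLast xs "schades").or e, (pvLast xs "bijlagen").or f,
         (pvLast xs "samenvatting").or g) := by
  induction xs generalizing a b c d e f g with
  | nil => simp [pvLast]
  | cons x rest ih =>
    simp only [List.foldl_cons, pvStepA_eq, ih, pvLast_cons, Option.or_assoc]

-- ===== VERDICT (by name: the statement is the Claim_ definition above) =====
theorem get_recording_tool_data_spec : Claim_equal_get_recording_tool_data := by
  intro xs _ _
  unfold Spec_get_recording_tool_data get_recording_tool_data get_recording_tool_data_alt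
  rw [pv_fold_eq]
  simp only [Option.or_none]
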